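-- pv_equiv track=rewrite | github.com/andrewlee229/shakespeareMarkov | processing/markov.py | markov_set
-- ===== SOURCE A (Python) =====
-- def markov_set(lines):
-- 	punct = [',','.',"\"","?","!",";",":","(",")"]
-- 	mapping = {}
-- 	for x in lines:
-- 		line = x.split()
-- 		prev_word = ""
-- 		i = 0
-- 		for l in line:
-- 			#Remove punctuation and capitalization
-- 			word = ''.join(ch for ch in l if ch not in punct)
-- 			word = word.lower()
-- 			if(word == "exit" or word == "exeunt"):
-- 				break
-- 			#Make I capitalized
-- 			if(word == "i"):
-- 				word = "I"
-- 			#See if word has a dash in it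
-- 			try:
-- 				if(word[len(word)-1] == "-"):
-- 					word = word[:-1]
-- 			except:
-- 				pass
-- 			#If beginning of line, just move on to next word
-- 			if i == 0:
-- 				i+=1
-- 			#Assoicate current word with previous word
-- 			else:
-- 				if prev_word in mapping:
-- 					mapping[prev_word].append(word)
-- 				else:
-- 					mapping.setdefault(prev_word,[]).append(word)
-- 				#check if end of the line and if so reset
-- 				if i == len:
-- 					prev_word = ""
-- 					break
-- 			prev_word = word
-- 	return(mapping)
-- ===== SOURCE B (Python) =====
-- def markov_set(lines):
--     punct = set(',."?!;:()')
--     mapping = {}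
--     for x in lines:
--         words = []
--         for tok in x.split():
--             w = ''.join(ch for ch in tok if ch not in punct).lower()
--             if w == "exit" or w == "exeunt":
--                 break
--             if w == "i":
--                 w = "I"
--             if w.endswith("-"):
--                 w = w[:-1]
--             words.append(w)
--         for prev, nxt in zip(words, words[1:]):
--             mapping.setdefault(prev, []).append(nxt)
--     return mapping
-- ===== Notes on version B (the rewrite author's own statement) =====
-- stated objective: simpler
-- what changed: Replaces the interleaved prev_word/i-flag single pass (with its dead 'i == len' branch and redundant in/setdefault split) by a two-phase decomposition: first materialize the cleaned word list per line, then pair consecutive words with zip and a single setdefault-append.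
import Mathlib
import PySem

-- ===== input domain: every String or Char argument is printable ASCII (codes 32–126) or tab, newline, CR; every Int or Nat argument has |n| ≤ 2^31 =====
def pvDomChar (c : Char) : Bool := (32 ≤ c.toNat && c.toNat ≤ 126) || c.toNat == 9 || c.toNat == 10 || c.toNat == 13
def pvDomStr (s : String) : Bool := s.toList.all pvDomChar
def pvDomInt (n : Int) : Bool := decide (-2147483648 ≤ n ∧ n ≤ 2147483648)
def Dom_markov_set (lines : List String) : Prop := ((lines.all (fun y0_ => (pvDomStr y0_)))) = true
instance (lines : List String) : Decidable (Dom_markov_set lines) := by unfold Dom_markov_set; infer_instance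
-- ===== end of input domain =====

-- B replaces A's interleaved prev_word/i-flag single pass (with its dead 'i == len' branch and
-- redundant in/setdefault split) by a two-phase decomposition: build the cleaned word list per
-- line, then pair consecutive words with zip and one setdefault-append; objective: simpler.

-- ===== PORT A =====
def pvPunct : List Char := [',', '.', '"', '?', '!', ';', ':', '(', ')']

-- A's per-token cleaning; 'none' is the break on exit/exeunt;
-- pyGet? = none is exactly the caught IndexError of word[len(word)-1] on ""
def pvDashA (word : String) : String :=
  match PySem.Str.pyGet? word (PySem.Str.len word - 1) with
  | some c => if c == '-' then PySem.Str.slice word none (some (-1)) else word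
  | none => word

def pvCleanA (l : String) : Option String :=
  let word := PySem.Str.lower (String.ofList (l.toList.filter (fun ch => !(pvPunct.contains ch))))
  if word == "exit" || word == "exeunt" then none
  else
    let word := if word == "i" then "I" else word
    some (pvDashA word)

-- per-line loop of A: state (mapping, prev_word, i); the Python 'if i == len' branch compares
-- the int i with the builtin function 'len', is always false, and is omitted as dead code
def pvLineA (toks : List String) (mapping : PySem.Dict String (List String))
    (prev : String) (i : Int) : PySem.Dict String (List String) :=
  match toks with
  | [] => mapping
  | l :: rest =>
    match pvCleanA l with
    | none => mapping
    | some word =>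
      if i == 0 then pvLineA rest mapping word (i + 1)
      else
        pvLineA rest
          (if mapping.contains prev then mapping.modify prev [] (fun v => v ++ [word])
           else (mapping.setdefault prev []).modify prev [] (fun v => v ++ [word]))
          word i

def markov_set (lines : List String) : List (String × List String) :=
  (lines.foldl (fun mapping x => pvLineA (PySem.Str.split₀ x) mapping "" 0) PySem.Dict.empty).items

-- ===== PORT B =====
-- B's per-token cleaning ('none' = break), with endswith instead of the try/except
def pvCleanB (t : String) : Option String :=
  let w := PySem.Str.lower (String.ofList (t.toList.filter (fun ch => !(pvPunct.contains ch))))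
  if w == "exit" || w == "exeunt" then none
  else
    let w := if w == "i" then "I" else w
    let w := if PySem.Str.endswith w "-" then PySem.Str.slice w none (some (-1)) else w
    some w

-- phase 1 of B: the cleaned words of one line
def pvWords (toks : List String) : List String :=
  match toks with
  | [] => []
  | t :: rest =>
    match pvCleanB t with
    | none => []
    | some w => w :: pvWords rest

def markov_set_alt (lines : List String) : List (String × List String) :=
  (lines.foldl
    (fun mapping x =>
      let ws := pvWords (PySem.Str.split₀ x)
      (ws.zip ws.tail).foldl
        (fun m p => (m.setdefault p.1 []).modify p.1 [] (fun v => v ++ [p.2])) mapping)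
    PySem.Dict.empty).items

-- ===== PRECONDITION & SPEC =====
def Spec_markov_set (lines : List String) (out : List (String × List String)) : Prop := out = markov_set_alt lines
instance (lines : List String) (out : List (String × List String)) : Decidable (Spec_markov_set lines out) := by unfold Spec_markov_set; infer_instance

-- ===== CLAIM (what is proved, stated in full; the proofs are below) =====
def Claim_equal_markov_set : Prop := ∀ (lines : List String), Dom_markov_set lines → Spec_markov_set lines (markov_set lines)

-- ===== LEMMAS AND PROOFS =====

-- A's try/except dash test agrees with B's endswith test on every string
lemma pvDash_eq (w : String) :
    pvDashA w
    = (if PySem.Str.endswith w "-" then PySem.Str.slice w none (some (-1)) else w) := by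
  unfold pvDashA
  rcases hr : w.toList.getLast? with _ | c
  · rw [List.getLast?_eq_none_iff] at hr
    have h1 : PySem.Str.pyGet? w (PySem.Str.len w - 1) = none := by
      simp [hr]; decide
    have h2 : PySem.Str.endswith w "-" = false := by
      simp [hr]; decide
    rw [h1, h2]
    simp
  · rw [List.getLast?_eq_some_iff] at hr
    obtain ⟨l, hl⟩ := hr
    have hlen : PySem.Str.len w - 1 = ((l.length : Nat) : Int) := by
      simp [PySem.Str.len_eq, hl]
    have h1 : PySem.Str.pyGet? w (PySem.Str.len w - 1) = some c := by
      rw [hlen, PySem.Str.pyGet?_natCast, hl]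
      simp
    have h2 : PySem.Str.endswith w "-" = (c == '-') := by
      by_cases hc : c = '-'
      · subst hc
        have hs : ("-" : String).toList <:+ w.toList := by
          rw [hl]; exact List.suffix_append l _
        rw [PySem.Str.endswith_eq, show ('-' == '-') = true from rfl]
        exact (PySem.Chars.endswith_iff _ _).mpr hs
      · have hf : PySem.Str.endswith w "-" = false := by
          rw [Bool.eq_false_iff]
          intro hcon
          rw [PySem.Str.endswith_eq, PySem.Chars.endswith_iff, hl] at hcon
          obtain ⟨t, ht⟩ := hcon
          have h3 := congrArg List.getLast? ht
          simp at h3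
          exact hc h3.symm
        rw [hf]
        simp [hc]
    rw [h1, h2]

-- the two per-token cleaners agree
lemma pvClean_eq (l : String) : pvCleanA l = pvCleanB l := by
  unfold pvCleanA pvCleanB
  simp only
  split
  · rfl
  · exact congrArg some (pvDash_eq _)

-- A's in/append-else-setdefault update is B's setdefault-then-append
lemma pvStep_eq (m : PySem.Dict String (List String)) (prev word : String) :
    (if m.contains prev then m.modify prev [] (fun v => v ++ [word])
     else (m.setdefault prev []).modify prev [] (fun v => v ++ [word]))
    = (m.setdefault prev []).modify prev [] (fun v => v ++ [word]) := by
  by_cases h : m.contains prev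
  · rw [if_pos h, PySem.Dict.setdefault_of_contains m [] h]
  · rw [if_neg h]

-- A's loop from the second token on builds exactly B's consecutive-pair fold
lemma pvLineA_one (toks : List String) : ∀ (m : PySem.Dict String (List String)) (prev : String),
    pvLineA toks m prev 1
    = ((prev :: pvWords toks).zip (pvWords toks)).foldl
        (fun m p => (m.setdefault p.1 []).modify p.1 [] (fun v => v ++ [p.2])) m := by
  induction toks with
  | nil => intro m prev; simp [pvLineA, pvWords]
  | cons t rest ih =>
    intro m prev
    rw [pvLineA, pvWords, pvClean_eq]
    rcases hc : pvCleanB t with _ | w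
    · simp
    · simp only
      rw [if_neg (by decide : ¬ ((1 : Int) == 0) = true), pvStep_eq, ih]
      rfl

-- the first token only seeds prev_word
lemma pvLineA_zero (toks : List String) (m : PySem.Dict String (List String)) :
    pvLineA toks m "" 0
    = ((pvWords toks).zip (pvWords toks).tail).foldl
        (fun m p => (m.setdefault p.1 []).modify p.1 [] (fun v => v ++ [p.2])) m := by
  cases toks with
  | nil => simp [pvLineA, pvWords]
  | cons t rest =>
    rw [pvLineA, pvWords, pvClean_eq]
    rcases hc : pvCleanB t with _ | w
    · simp
    · simp only
      rw [if_pos (by decide : ((0 : Int) == 0) = true)]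
      have h01 : (0 : Int) + 1 = 1 := by norm_num
      rw [h01, pvLineA_one]
      rfl

-- ===== VERDICT (by name: the statement is the Claim_ definition above) =====
theorem markov_set_spec : Claim_equal_markov_set := by
  intro lines _
  unfold Spec_markov_set markov_set markov_set_alt
  congr 1
  apply PySem.List.foldl_congr_mem
  intro m x _
  exact pvLineA_zero _ m
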